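-- pv_equiv track=rewrite | github.com/Tenebraacs/prog | py/school/agazati_03/Fegyhaz/fegyhaz.py | szamol_fegyor_rab
-- ===== SOURCE A (Python) =====
-- def szamol_fegyor_rab(adatok):
--     fegyorok_szama = 0
--     rabok_szama = 0
--     for adat in adatok:
--         azonosito = adat[0]
--         if azonosito.startswith('F'):
--             fegyorok_szama += 1
--         else:
--             rabok_szama += 1
--     return fegyorok_szama, rabok_szama
-- ===== SOURCE B (Python) =====
-- def szamol_fegyor_rab(adatok):
--     def go(lo, hi):
--         if lo == hi:
--             return (0, 0)
--         if hi - lo == 1: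
--             if adatok[lo][0].startswith('F'):
--                 return (1, 0)
--             return (0, 1)
--         mid = (lo + hi) // 2
--         f1, r1 = go(lo, mid)
--         f2, r2 = go(mid, hi)
--         return (f1 + f2, r1 + r2)
--     return go(0, len(adatok))
-- ===== Notes on version B (the rewrite author's own statement) =====
-- stated objective: alternative
-- what changed: Replaces A's single iterative pass with two mutable accumulators by a divide-and-conquer recursion that splits the index range in half, counts each half independently and adds the (guards, prisoners) pairs; correct because both components are additive over concatenation of the list.
import Mathlib
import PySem

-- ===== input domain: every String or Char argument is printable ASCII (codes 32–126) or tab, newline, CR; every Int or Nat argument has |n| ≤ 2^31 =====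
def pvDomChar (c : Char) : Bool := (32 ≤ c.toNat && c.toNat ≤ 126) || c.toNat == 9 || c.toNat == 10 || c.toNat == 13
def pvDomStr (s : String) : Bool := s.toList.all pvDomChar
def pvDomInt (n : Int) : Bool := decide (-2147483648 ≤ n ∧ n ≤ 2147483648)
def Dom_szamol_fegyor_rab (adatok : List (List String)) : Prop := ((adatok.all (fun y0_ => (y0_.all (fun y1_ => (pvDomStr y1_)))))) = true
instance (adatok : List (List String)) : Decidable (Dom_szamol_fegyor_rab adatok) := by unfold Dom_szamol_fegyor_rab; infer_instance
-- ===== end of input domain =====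

-- B: divide-and-conquer recursion on the index range (count each half, add the pairs), instead of A's single iterative pass with two accumulators (return-value equivalence; no speed claim).
-- ===== PORT A =====
def szamol_fegyor_rab (adatok : List (List String)) : Int × Int :=
  adatok.foldl (fun st adat =>
    match PySem.List.pyGet? adat 0 with
    | none => st  -- adat[0] raises IndexError; excluded by Pre_
    | some azonosito =>
      if PySem.Str.startswith azonosito "F" then (st.1 + 1, st.2)
      else (st.1, st.2 + 1)) (0, 0)

-- ===== PORT B =====
-- go(lo, hi) from Source B. The Nat fuel argument is only a totality device (structural recursion);
-- it starts at len(adatok) and always dominates hi - lo, so it never cuts the recursion short.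
-- 'hi ≤ lo' (rather than Python's 'lo == hi') is likewise a totality guard: hi < lo is
-- unreachable from go(0, len(adatok)).
def szamol_go (adatok : List (List String)) : Nat → Int → Int → Int × Int
  | 0, _, _ => (0, 0)
  | fuel + 1, lo, hi =>
    if hi ≤ lo then (0, 0)
    else if hi - lo = 1 then
      if PySem.Str.startswith
          ((PySem.List.pyGet? ((PySem.List.pyGet? adatok lo).getD []) 0).getD "") "F"
      then (1, 0) else (0, 1)
    else
      let mid := PySem.Int.floordiv (lo + hi) 2
      let p1 := szamol_go adatok fuel lo mid
      let p2 := szamol_go adatok fuel mid hi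
      (p1.1 + p2.1, p1.2 + p2.2)

def szamol_fegyor_rab_alt (adatok : List (List String)) : Int × Int :=
  szamol_go adatok adatok.length 0 (adatok.length : Int)

-- ===== PRECONDITION & SPEC =====
-- Pre_ excludes inputs with an empty inner list, on which A's adat[0] raises IndexError (B raises there too).
def Pre_szamol_fegyor_rab (adatok : List (List String)) : Prop :=
  ∀ adat ∈ adatok, adat ≠ []
instance (adatok : List (List String)) : Decidable (Pre_szamol_fegyor_rab adatok) := by
  unfold Pre_szamol_fegyor_rab; infer_instance
def pvWitness_szamol_fegyor_rab : List (List String) := [["F1", "Kiss"], ["R2", "Nagy"]]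

def Spec_szamol_fegyor_rab (adatok : List (List String)) (out : Int × Int) : Prop := out = szamol_fegyor_rab_alt adatok
instance (adatok : List (List String)) (out : Int × Int) : Decidable (Spec_szamol_fegyor_rab adatok out) := by unfold Spec_szamol_fegyor_rab; infer_instance

-- ===== CLAIM (what is proved, stated in full; the proofs are below) =====
def Claim_equal_szamol_fegyor_rab : Prop := ∀ (adatok : List (List String)), Dom_szamol_fegyor_rab adatok → Pre_szamol_fegyor_rab adatok → Spec_szamol_fegyor_rab adatok (szamol_fegyor_rab adatok)

-- ===== LEMMAS AND PROOFS =====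

def pvGuard (adat : List String) : Bool :=
  PySem.Str.startswith ((PySem.List.pyGet? adat 0).getD "") "F"

-- A's loop computes (number of guards, total minus that) over any starting pair.
lemma szamol_loop (adatok : List (List String)) (h : ∀ adat ∈ adatok, adat ≠ []) :
    ∀ p : Int × Int,
      adatok.foldl (fun st adat =>
        match PySem.List.pyGet? adat 0 with
        | none => st
        | some azonosito =>
          if PySem.Str.startswith azonosito "F" then (st.1 + 1, st.2)
          else (st.1, st.2 + 1)) p
      = (p.1 + (adatok.countP pvGuard : Int),
         p.2 + ((adatok.length : Int) - (adatok.countP pvGuard : Int))) := by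
  induction adatok with
  | nil => intro p; simp
  | cons a t ih =>
    intro p
    have ha : a ≠ [] := h a (by simp)
    obtain ⟨x, xs, rfl⟩ := List.exists_cons_of_ne_nil ha
    have ht : ∀ adat ∈ t, adat ≠ [] := fun adat hm => h adat (by simp [hm])
    simp only [List.foldl_cons]
    rw [ih ht]
    have hget : PySem.List.pyGet? (x :: xs) 0 = some x := by
      simp [PySem.List.pyGet?, PySem.List.pyIdx?]
    rw [hget]
    by_cases hg : PySem.Chars.startswith x.toList ['F'] = true <;>
      simp [pvGuard, PySem.Str.startswith, hg] <;> omega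

-- B's recursion on the range [lo, hi) computes the same pair for the corresponding segment,
-- for any fuel dominating the range length.
lemma szamol_go_eq (adatok : List (List String)) (hpre : ∀ adat ∈ adatok, adat ≠ []) :
    ∀ (fuel : Nat) (lo hi : Int), 0 ≤ lo → lo ≤ hi → hi ≤ (adatok.length : Int) →
      (hi - lo).toNat ≤ fuel →
      szamol_go adatok fuel lo hi =
        ((((adatok.drop lo.toNat).take (hi - lo).toNat).countP pvGuard : Int),
         (hi - lo) - (((adatok.drop lo.toNat).take (hi - lo).toNat).countP pvGuard : Int)) := by
  intro fuel
  induction fuel with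
  | zero =>
    intro lo hi h0 hlh hhl hf
    have : hi = lo := by omega
    subst this
    simp [szamol_go]
  | succ fuel ih =>
    intro lo hi h0 hlh hhl hf
    show (if hi ≤ lo then ((0 : Int), (0 : Int))
      else if hi - lo = 1 then
        if PySem.Str.startswith
            ((PySem.List.pyGet? ((PySem.List.pyGet? adatok lo).getD []) 0).getD "") "F"
        then (1, 0) else (0, 1)
      else
        let mid := PySem.Int.floordiv (lo + hi) 2
        let p1 := szamol_go adatok fuel lo mid
        let p2 := szamol_go adatok fuel mid hi
        (p1.1 + p2.1, p1.2 + p2.2)) = _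
    by_cases heq : hi ≤ lo
    · have : hi = lo := le_antisymm heq hlh
      subst this
      simp
    · rw [if_neg heq]
      by_cases h1 : hi - lo = 1
      · rw [if_pos h1]
        have hlt : lo.toNat < adatok.length := by omega
        have hget : PySem.List.pyGet? adatok lo = some adatok[lo.toNat] := by
          rw [PySem.List.pyGet?_of_nonneg adatok h0]
          exact List.getElem?_eq_getElem hlt
        have hseg : (adatok.drop lo.toNat).take (hi - lo).toNat = [adatok[lo.toNat]] := by
          have hd : adatok.drop lo.toNat = adatok[lo.toNat] :: adatok.drop (lo.toNat + 1) :=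
            List.drop_eq_getElem_cons hlt
          rw [h1, hd]
          rfl
        rw [hseg, hget, h1]
        have hne : adatok[lo.toNat] ≠ [] := hpre _ (List.getElem_mem hlt)
        obtain ⟨x, xs, hx⟩ := List.exists_cons_of_ne_nil hne
        rw [hx]
        have hget0 : PySem.List.pyGet? (x :: xs) 0 = some x := by
          simp [PySem.List.pyGet?, PySem.List.pyIdx?]
        simp only [Option.getD_some, hget0]
        by_cases hg : PySem.Chars.startswith x.toList ['F'] = true <;>
          simp [pvGuard, PySem.Str.startswith, hg]
      · rw [if_neg h1]
        have hm : PySem.Int.floordiv (lo + hi) 2 = (lo + hi) / 2 :=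
          PySem.Int.floordiv_eq_ediv_of_pos (by norm_num)
        have hb1 : lo < (lo + hi) / 2 := by omega
        have hb2 : (lo + hi) / 2 < hi := by omega
        have e1 := ih lo ((lo + hi) / 2) h0 (le_of_lt hb1) (by omega) (by omega)
        have e2 := ih ((lo + hi) / 2) hi (by omega) (le_of_lt hb2) hhl (by omega)
        simp only [hm, e1, e2]
        -- segment additivity
        have hsplit : (adatok.drop lo.toNat).take (hi - lo).toNat
            = (adatok.drop lo.toNat).take ((lo + hi) / 2 - lo).toNat
              ++ (adatok.drop ((lo + hi) / 2).toNat).take (hi - (lo + hi) / 2).toNat := by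
          have h2 : (hi - lo).toNat = ((lo + hi) / 2 - lo).toNat + (hi - (lo + hi) / 2).toNat := by
            omega
          rw [h2, List.take_add]
          congr 1
          rw [List.drop_drop]
          congr 2
          omega
        rw [hsplit, List.countP_append]
        simp only [Prod.mk.injEq]
        constructor
        · push_cast; ring
        · push_cast; ring

-- ===== VERDICT (by name: the statement is the Claim_ definition above) =====
theorem szamol_fegyor_rab_spec : Claim_equal_szamol_fegyor_rab := by
  intro adatok hdom hpre
  unfold Spec_szamol_fegyor_rab szamol_fegyor_rab szamol_fegyor_rab_alt
  rw [szamol_loop adatok hpre (0, 0),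
      szamol_go_eq adatok hpre adatok.length 0 (adatok.length : Int)
        le_rfl (by positivity) le_rfl (by omega)]
  simp
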